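-- pv_equiv track=rewrite | github.com/muccc/iridium-toolkit | bitsparser.py | de_dqpsk
-- ===== SOURCE A (Python) =====
-- def de_dqpsk(bits):
--     symbols=[]
--     imap=[0,1,3,2]
--     # back into bpsk symbols
--     for x in range(0,len(bits)-1,2):
--         symbols.append(imap[int(bits[x+0])*2 + int(bits[x+1])])
--
--     # undo differential decoding
--     for c in range(1,len(symbols)):
--         symbols[c]=(symbols[c-1]+symbols[c])%4
--
--     return symbols
-- ===== SOURCE B (Python) =====
-- def de_dqpsk(bits):
--     # single fused pass: running accumulator replaces the separate in-place
--     # mod-4 prefix loop over the intermediate symbol list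
--     imap = [0, 1, 3, 2]
--     acc = 0
--     out = []
--     for x in range(0, len(bits) - 1, 2):
--         s = imap[int(bits[x]) * 2 + int(bits[x + 1])]
--         acc = (acc + s) % 4
--         out.append(acc)
--     return out
-- ===== Notes on version B (the rewrite author's own statement) =====
-- stated objective: simpler
-- what changed: B fuses A's two passes (build raw symbol list, then in-place mod-4 prefix accumulation) into one loop with a running accumulator, never materialising the intermediate list; correctness uses that each raw symbol is already in 0..3 so starting the accumulator at 0 reproduces the first symbol.
import Mathlib
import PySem

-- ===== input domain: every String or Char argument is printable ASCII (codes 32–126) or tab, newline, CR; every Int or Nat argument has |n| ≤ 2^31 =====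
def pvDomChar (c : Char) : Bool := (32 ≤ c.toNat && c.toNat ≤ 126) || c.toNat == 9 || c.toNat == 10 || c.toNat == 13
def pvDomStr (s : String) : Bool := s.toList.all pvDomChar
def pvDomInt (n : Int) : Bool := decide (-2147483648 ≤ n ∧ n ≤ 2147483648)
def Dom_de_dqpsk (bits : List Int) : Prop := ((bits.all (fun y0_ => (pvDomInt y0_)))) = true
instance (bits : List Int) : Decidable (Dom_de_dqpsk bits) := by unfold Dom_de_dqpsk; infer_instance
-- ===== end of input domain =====

-- B fuses A's two passes into one accumulator loop; same intermediate values (imap lookup), no intermediate list.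

-- imap = [0,1,3,2] and the per-pair lookup imap[int(bits[x])*2 + int(bits[x+1])]: both Pythons
-- write this identical expression, so it is one shared helper.
def pvImap : List Int := [0, 1, 3, 2]

def pvSym (bits : List Int) (x : Int) : Int :=
  (PySem.List.pyGet? pvImap
    ((PySem.List.pyGet? bits x).getD 0 * 2 + (PySem.List.pyGet? bits (x + 1)).getD 0)).getD 0

-- ===== PORT A =====
def de_dqpsk (bits : List Int) : List Int :=
  -- first loop: symbols.append(imap[...])
  let symbols := (PySem.List.pyRange 0 (PySem.List.len bits - 1) 2).foldl
    (fun acc x => acc ++ [pvSym bits x]) []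
  -- second loop: symbols[c] = (symbols[c-1] + symbols[c]) % 4
  (PySem.List.pyRange 1 (PySem.List.len symbols) 1).foldl
    (fun s c => s.set c.toNat (PySem.Int.mod (s.getD (c - 1).toNat 0 + s.getD c.toNat 0) 4))
    symbols

-- ===== PORT B =====
def de_dqpsk_alt (bits : List Int) : List Int :=
  ((PySem.List.pyRange 0 (PySem.List.len bits - 1) 2).foldl
    (fun (st : Int × List Int) x =>
      let a := PySem.Int.mod (st.1 + pvSym bits x) 4
      (a, st.2 ++ [a]))
    ((0 : Int), ([] : List Int))).2

-- ===== PRECONDITION & SPEC =====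
-- Pre_ excludes exactly the inputs where Python A raises IndexError: some pair of bits
-- yields an imap index outside -4..3 (inside that range, including negatives, Python returns).
def Pre_de_dqpsk (bits : List Int) : Prop :=
  ∀ x ∈ PySem.List.pyRange 0 (PySem.List.len bits - 1) 2,
    PySem.Raise.InRange 4
      ((PySem.List.pyGet? bits x).getD 0 * 2 + (PySem.List.pyGet? bits (x + 1)).getD 0)
instance (bits : List Int) : Decidable (Pre_de_dqpsk bits) := by unfold Pre_de_dqpsk; infer_instance

def pvWitness_de_dqpsk : List Int := [0, 1, 1, 0, 1, 1]

def Spec_de_dqpsk (bits : List Int) (out : List Int) : Prop := out = de_dqpsk_alt bits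
instance (bits : List Int) (out : List Int) : Decidable (Spec_de_dqpsk bits out) := by unfold Spec_de_dqpsk; infer_instance

-- ===== CLAIM (what is proved, stated in full; the proofs are below) =====
def Claim_equal_de_dqpsk : Prop := ∀ (bits : List Int), Dom_de_dqpsk bits → Pre_de_dqpsk bits → Spec_de_dqpsk bits (de_dqpsk bits)

-- ===== LEMMAS AND PROOFS =====

-- the differential scan both programs compute, as a structural recursion
def pvScan : Int → List Int → List Int
  | _, [] => []
  | a, s :: t => PySem.Int.mod (a + s) 4 :: pvScan (PySem.Int.mod (a + s) 4) t

-- every value fetched from imap (or the out-of-range default 0) lies in 0..3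
theorem pvSym_bounds (bits : List Int) (x : Int) : 0 ≤ pvSym bits x ∧ pvSym bits x < 4 := by
  unfold pvSym
  rcases h : PySem.List.pyGet? pvImap
      ((PySem.List.pyGet? bits x).getD 0 * 2 + (PySem.List.pyGet? bits (x + 1)).getD 0) with _ | v
  · simp
  · have hv := PySem.List.mem_of_pyGet?_eq_some _ h
    simp only [pvImap, List.mem_cons, List.not_mem_nil, or_false] at hv
    rcases hv with rfl | rfl | rfl | rfl <;> simp

-- B's fold is pvScan
theorem foldl_alt_eq_scan (g : Int → Int) (l : List Int) (a : Int) (ys : List Int) :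
    (l.foldl (fun (st : Int × List Int) x =>
        (PySem.Int.mod (st.1 + g x) 4, st.2 ++ [PySem.Int.mod (st.1 + g x) 4])) (a, ys)).2
      = ys ++ pvScan a (l.map g) := by
  induction l generalizing a ys with
  | nil => simp [pvScan]
  | cons s t ih =>
    rw [List.foldl_cons, ih]
    simp [pvScan]

-- A's second (in-place) loop turns pre ++ suf into pre ++ pvScan a suf, where a is pre's last entry
theorem foldl_set_eq_scan (suf : List Int) :
    ∀ (pre : List Int) (a : Int), pre ≠ [] → pre.getLast? = some a →
    (PySem.List.pyRange (pre.length : Int) ((pre.length : Int) + (suf.length : Int)) 1).foldl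
      (fun s c => s.set c.toNat (PySem.Int.mod (s.getD (c - 1).toNat 0 + s.getD c.toNat 0) 4))
      (pre ++ suf)
    = pre ++ pvScan a suf := by
  induction suf with
  | nil =>
    intro pre a _ _
    rw [PySem.List.pyRange_one_eq_nil (by simp)]
    simp [pvScan]
  | cons s t ih =>
    intro pre a hne hlast
    have hpos : 0 < pre.length := List.length_pos_iff.mpr hne
    have hlt : (pre.length : Int) < (pre.length : Int) + ((s :: t).length : Int) := by
      have : 0 < (s :: t).length := by simp
      omega
    rw [PySem.List.pyRange_one_cons hlt]
    simp only [List.foldl_cons]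
    have hc : ((pre.length : Int)).toNat = pre.length := by omega
    have hc1 : ((pre.length : Int) - 1).toNat = pre.length - 1 := by omega
    have hprev : (pre ++ s :: t).getD (pre.length - 1) 0 = a := by
      have h1 : pre.length - 1 < pre.length := by omega
      rw [List.getD_eq_getElem?_getD, List.getElem?_append_left h1]
      rw [List.getLast?_eq_getElem?] at hlast
      simp [hlast]
    have hcur : (pre ++ s :: t).getD pre.length 0 = s := by
      rw [List.getD_eq_getElem?_getD, List.getElem?_append_right (le_refl _)]
      simp
    have hset : (pre ++ s :: t).set pre.length (PySem.Int.mod (a + s) 4)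
        = (pre ++ [PySem.Int.mod (a + s) 4]) ++ t := by
      rw [List.set_append]
      simp
    rw [hc, hc1, hprev, hcur, hset]
    have harg : (pre.length : Int) + ((s :: t).length : Int)
        = (((pre ++ [PySem.Int.mod (a + s) 4]).length : Int))
          + ((t.length : Int)) := by
      simp; omega
    have hstart : (pre.length : Int) + 1 = ((pre ++ [PySem.Int.mod (a + s) 4]).length : Int) := by
      simp
    rw [hstart, harg, ih (pre ++ [PySem.Int.mod (a + s) 4]) (PySem.Int.mod (a + s) 4)
      (by simp) (by simp)]
    simp [pvScan]

-- ===== VERDICT (by name: the statement is the Claim_ definition above) =====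
theorem de_dqpsk_spec : Claim_equal_de_dqpsk := by
  intro bits _ _
  unfold Spec_de_dqpsk de_dqpsk de_dqpsk_alt
  rw [PySem.List.foldl_append_singleton_eq_map]
  simp only [List.nil_append]
  -- rewrite B's fold over the range as a fold over the mapped raw-symbol list
  have hB : ((PySem.List.pyRange 0 (PySem.List.len bits - 1) 2).foldl
      (fun (st : Int × List Int) x =>
        (PySem.Int.mod (st.1 + pvSym bits x) 4, st.2 ++ [PySem.Int.mod (st.1 + pvSym bits x) 4]))
      ((0 : Int), ([] : List Int))).2
      = pvScan 0 ((PySem.List.pyRange 0 (PySem.List.len bits - 1) 2).map (pvSym bits)) := by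
    rw [foldl_alt_eq_scan]
    simp
  rw [hB]
  rcases hR : PySem.List.pyRange 0 (PySem.List.len bits - 1) 2 with _ | ⟨x, R'⟩
  · simp [pvScan, PySem.List.len_eq, PySem.List.pyRange_one_eq_nil]
  · -- raw = s0 :: rest
    simp only [List.map_cons]
    set s0 := pvSym bits x with hs0
    set rest := R'.map (pvSym bits) with hrest
    have hb := pvSym_bounds bits x
    have hmod : PySem.Int.mod (0 + s0) 4 = s0 := by
      rw [PySem.Int.mod_eq_emod_of_pos (by omega)]
      rw [zero_add, Int.emod_eq_of_lt hb.1 hb.2]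
    have hA := foldl_set_eq_scan rest [s0] s0 (by simp) (by simp)
    simp only [List.singleton_append, List.length_cons, List.length_nil, zero_add,
      Nat.cast_one] at hA
    have hlen : PySem.List.len (s0 :: rest) = (1 : Int) + (rest.length : Int) := by
      simp [PySem.List.len_eq]; omega
    rw [hlen, hA]
    rw [show pvScan 0 (s0 :: rest)
        = PySem.Int.mod (0 + s0) 4 :: pvScan (PySem.Int.mod (0 + s0) 4) rest from rfl, hmod]
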